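-- pv_equiv track=rewrite | github.com/yeahzizi/algorithm | 프로그래머스/level 2/PR. level2. 할인행사.py | solution
-- ===== SOURCE A (Python) =====
-- def solution(want, number, discount):
--     answer = 0
--     deserve = 10
--     check = dict()
--
--     for w in range(len(want)):
--         check.setdefault(want[w], number[w])
--
--     for i in range(len(discount) - deserve + 1):
--         cnt = {}
--         for j in range(i, deserve + i):
--             cnt.setdefault(discount[j], 0)
--             cnt[discount[j]] += 1
--         if cnt == check:
--             answer += 1
--
--     return answer
-- ===== SOURCE B (Python) =====
-- def solution(want, number, discount):
--     check = {}
--     for w, n in zip(want, number):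
--         check.setdefault(w, n)
--     answer = 0
--     window = {}
--     for idx, item in enumerate(discount):
--         window[item] = window.get(item, 0) + 1
--         if idx >= 10:
--             out = discount[idx - 10]
--             c = window[out] - 1
--             if c == 0:
--                 del window[out]
--             else:
--                 window[out] = c
--         if idx >= 9 and window == check:
--             answer += 1
--     return answer
-- ===== Notes on version B (the rewrite author's own statement) =====
-- stated objective: faster
-- what changed: Instead of rebuilding a fresh 10-item counter for every start index, B slides one window counter across discount (increment the entering item, decrement/delete the leaving one) and compares it to check once per position.
import Mathlib
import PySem

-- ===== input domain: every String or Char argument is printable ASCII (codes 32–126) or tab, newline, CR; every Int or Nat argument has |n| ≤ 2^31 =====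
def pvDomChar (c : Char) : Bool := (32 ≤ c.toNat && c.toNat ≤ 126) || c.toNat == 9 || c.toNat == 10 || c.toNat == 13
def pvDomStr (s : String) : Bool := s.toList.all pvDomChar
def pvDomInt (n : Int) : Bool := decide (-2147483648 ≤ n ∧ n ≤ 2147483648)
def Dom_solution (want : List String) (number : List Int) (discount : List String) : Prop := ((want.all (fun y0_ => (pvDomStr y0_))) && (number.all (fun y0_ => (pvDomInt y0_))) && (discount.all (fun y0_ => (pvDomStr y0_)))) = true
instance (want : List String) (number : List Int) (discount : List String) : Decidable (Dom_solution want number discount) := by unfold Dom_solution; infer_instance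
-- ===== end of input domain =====

-- B slides one running window counter across discount instead of rebuilding a 10-item counter per start index (objective: faster, constant-factor).

-- Python's '==' on dicts (order-insensitive mapping equality); used by both ports for 'cnt == check' / 'window == check'.
def pyDictEq (d1 d2 : PySem.Dict String Int) : Bool :=
  d1.keys.all (fun k => d2.get? k == d1.get? k) && d2.keys.all (fun k => d1.get? k == d2.get? k)

-- ===== PORT A =====
-- 'want[w]' / 'number[w]' / 'discount[j]' are ported with pyGetD: inside Pre_solution every index
-- A dereferences is in range, so the default is never taken there (outside Pre_ A raises IndexError).
def solution (want : List String) (number : List Int) (discount : List String) : Int :=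
  let check := (PySem.List.pyRange 0 (want.length : Int) 1).foldl
    (fun ch w => ch.setdefault (PySem.List.pyGetD want w "") (PySem.List.pyGetD number w 0))
    PySem.Dict.empty
  (PySem.List.pyRange 0 ((discount.length : Int) - 10 + 1) 1).foldl
    (fun answer i =>
      let cnt := (PySem.List.pyRange i (10 + i) 1).foldl
        (fun d j =>
          let x := PySem.List.pyGetD discount j ""
          let d1 := d.setdefault x 0
          d1.insert x (d1.getD x 0 + 1))
        PySem.Dict.empty
      if pyDictEq cnt check then answer + 1 else answer)
    0

-- ===== PORT B =====
-- 'discount[idx - 10]' is in range whenever reached; 'window[out]' is ported with getD: the key is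
-- always present there (the leaving item is in the window), so the default is never taken.
def solution_alt (want : List String) (number : List Int) (discount : List String) : Int :=
  let check := (want.zip number).foldl (fun ch p => ch.setdefault p.1 p.2) PySem.Dict.empty
  ((PySem.List.enumerate discount 0).foldl
    (fun (st : PySem.Dict String Int × Int) p =>
      let w1 := st.1.insert p.2 (st.1.getD p.2 0 + 1)
      let w2 :=
        if 10 ≤ p.1 then
          let out := PySem.List.pyGetD discount (p.1 - 10) ""
          let c := w1.getD out 0 - 1
          if c = 0 then w1.erase out else w1.insert out c
        else w1
      let ans := if 9 ≤ p.1 && pyDictEq w2 check then st.2 + 1 else st.2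
      (w2, ans))
    (PySem.Dict.empty, 0)).2

-- ===== PRECONDITION & SPEC =====
-- Pre_ excludes exactly the inputs where A raises IndexError (number shorter than want).
def Pre_solution (want : List String) (number : List Int) (discount : List String) : Prop :=
  want.length ≤ number.length
instance (want : List String) (number : List Int) (discount : List String) : Decidable (Pre_solution want number discount) := by unfold Pre_solution; infer_instance

def pvWitness_solution : List String × List Int × List String :=
  (["a"], [2], ["a", "a", "b", "a", "a", "a", "a", "a", "a", "a", "a"])

def Spec_solution (want : List String) (number : List Int) (discount : List String) (out : Int) : Prop := out = solution_alt want number discount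
instance (want : List String) (number : List Int) (discount : List String) (out : Int) : Decidable (Spec_solution want number discount out) := by unfold Spec_solution; infer_instance

-- ===== CLAIM (what is proved, stated in full; the proofs are below) =====
def Claim_equal_solution : Prop := ∀ (want : List String) (number : List Int) (discount : List String), Dom_solution want number discount → Pre_solution want number discount → Spec_solution want number discount (solution want number discount)

-- ===== LEMMAS AND PROOFS =====

-- the 10-item window of discount starting at i
def win (discount : List String) (i : Nat) : List String := (discount.drop i).take 10

-- the per-window predicate both programs evaluate
def winPred (check : PySem.Dict String Int) (discount : List String) (i : Nat) : Bool :=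
  pyDictEq (PySem.Dict.counter (win discount i)) check

-- the mapping of B's running window dict after processing prefix pre
def winMap (pre : List String) (k : String) : Option Int :=
  if (pre.drop (pre.length - 10)).count k = 0 then none
  else some (((pre.drop (pre.length - 10)).count k : Nat) : Int)

theorem get?_erase_dict (d : PySem.Dict String Int) (k k' : String) :
    (d.erase k).get? k' = if k' = k then none else d.get? k' := by
  obtain ⟨items⟩ := d
  induction items with
  | nil => simp [PySem.Dict.erase, PySem.Dict.get?]
  | cons p t ih =>
    simp only [PySem.Dict.erase, PySem.Dict.get?, List.filter_cons, List.find?_cons] at *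
    by_cases hk : p.1 = k <;> by_cases hk' : p.1 = k' <;> by_cases hkk : k' = k <;>
      simp_all [beq_eq_decide]

theorem get?_counter_eq (xs : List String) (k : String) :
    (PySem.Dict.counter xs).get? k = if xs.count k = 0 then none else some ((xs.count k : Nat) : Int) := by
  by_cases hc : (PySem.Dict.counter xs).contains k
  · have hmem : k ∈ xs := by
      have := PySem.Dict.contains_counter xs k
      rw [hc] at this
      exact List.contains_iff_mem.mp this.symm
    have hcnt : xs.count k ≠ 0 := by
      simpa [List.count_eq_zero] using hmem
    rw [if_neg hcnt]
    have hsome : ((PySem.Dict.counter xs).get? k).isSome := by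
      rw [← PySem.Dict.contains_eq_isSome_get?]; exact hc
    obtain ⟨v, hv⟩ := Option.isSome_iff_exists.mp hsome
    have := PySem.Dict.getD_of_get?_eq_some _ 0 hv
    rw [PySem.Dict.getD_counter] at this
    rw [hv, ← this]
  · have hnot : ¬ k ∈ xs := by
      have := PySem.Dict.contains_counter xs k
      rw [Bool.not_eq_true] at hc
      rw [hc] at this
      intro hm
      have : xs.contains k = false := this.symm
      simp at this
      exact this hm
    have hcnt : xs.count k = 0 := List.count_eq_zero.mpr hnot
    rw [if_pos hcnt]
    rw [PySem.Dict.get?_eq_none_iff_contains]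
    simpa using hc

theorem mem_keys_iff_isSome (d : PySem.Dict String Int) (k : String) :
    k ∈ d.keys ↔ (d.get? k).isSome := by
  rw [← PySem.Dict.contains_iff_mem_keys, PySem.Dict.contains_eq_isSome_get?]

theorem pyDictEq_congr_left (d d' c : PySem.Dict String Int)
    (h : ∀ k, d.get? k = d'.get? k) : pyDictEq d c = pyDictEq d' c := by
  have hall : ∀ (e e' : PySem.Dict String Int), (∀ k, e.get? k = e'.get? k) →
      ∀ (f f' : String → Bool), (∀ k, f k = f' k) →
      (e.keys.all f = true ↔ e'.keys.all f' = true) := by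
    intro e e' he f f' hf
    simp only [List.all_eq_true]
    constructor
    · intro hc k hk
      rw [← hf]
      exact hc k (by rw [mem_keys_iff_isSome, ← he, ← mem_keys_iff_isSome] at hk; exact hk)
    · intro hc k hk
      rw [hf]
      exact hc k (by rw [mem_keys_iff_isSome, he, ← mem_keys_iff_isSome] at hk; exact hk)
  unfold pyDictEq
  rw [Bool.eq_iff_iff]
  simp only [Bool.and_eq_true]
  constructor
  · rintro ⟨h1, h2⟩
    exact ⟨(hall d d' h _ _ (fun k => by rw [h k])).mp h1,
      (hall c c (fun _ => rfl) _ _ (fun k => by rw [h k])).mp h2⟩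
  · rintro ⟨h1, h2⟩
    exact ⟨(hall d d' h _ _ (fun k => by rw [h k])).mpr h1,
      (hall c c (fun _ => rfl) _ _ (fun k => by rw [h k])).mpr h2⟩

theorem stepA_collapse (d : PySem.Dict String Int) (x : String) :
    (d.setdefault x 0).insert x ((d.setdefault x 0).getD x 0 + 1) = d.insert x (d.getD x 0 + 1) := by
  rw [PySem.Dict.getD_setdefault_self]
  by_cases hc : d.contains x
  · rw [PySem.Dict.setdefault_of_contains _ _ hc]
  · rw [PySem.Dict.setdefault_of_not_contains _ _ (by simpa using hc),
      PySem.Dict.insert_insert_self]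

theorem map_range_pyGetD (discount : List String) (k : Nat) (h : k + 10 ≤ discount.length) :
    (List.range 10).map (fun (j : Nat) => PySem.List.pyGetD discount ((k : Int) + (j : Int)) "") = win discount k := by
  apply List.ext_getElem
  · simp [win]; omega
  · intro j h1 h2
    simp only [List.getElem_map, win, List.getElem_take, List.getElem_drop]
    have hj : j < 10 := by simpa using h1
    rw [List.getElem_range]
    have : ((k : Int) + (j : Int)) = ((k + j : Nat) : Int) := by push_cast; ring
    rw [this, PySem.List.pyGetD_natCast, List.getD_eq_getElem _ _ (by omega)]

theorem zip_take_right (want : List String) (number : List Int)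
    (h : want.length ≤ number.length) :
    want.zip (number.take want.length) = want.zip number := by
  induction want generalizing number with
  | nil => simp
  | cons w ws ih =>
    cases number with
    | nil => simp at h
    | cons n ns =>
      simp only [List.length_cons, List.take_succ_cons, List.zip_cons_cons]
      rw [ih ns (by simpa using h)]

theorem checkA_eq_checkB (want : List String) (number : List Int)
    (h : want.length ≤ number.length) :
    (PySem.List.pyRange 0 (want.length : Int) 1).foldl
      (fun ch w => ch.setdefault (PySem.List.pyGetD want w "") (PySem.List.pyGetD number w 0))
      PySem.Dict.empty
    = (want.zip number).foldl (fun ch p => ch.setdefault p.1 p.2) PySem.Dict.empty := by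
  have aux : ∀ (kk : Nat), kk ≤ want.length → kk ≤ number.length →
      (List.range kk).foldl
        (fun ch k => ch.setdefault (want.getD k "") (number.getD k 0)) PySem.Dict.empty
      = ((want.take kk).zip (number.take kk)).foldl (fun ch p => ch.setdefault p.1 p.2) PySem.Dict.empty := by
    intro kk
    induction kk with
    | zero => simp
    | succ m ih =>
      intro h1 h2
      rw [List.range_succ, List.foldl_append, ih (by omega) (by omega)]
      have hw : want.take (m + 1) = want.take m ++ [want[m]'(by omega)] := by
        rw [List.take_add_one]
        simp [List.getElem?_eq_getElem (by omega : m < want.length)]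
      have hn : number.take (m + 1) = number.take m ++ [number[m]'(by omega)] := by
        rw [List.take_add_one]
        simp [List.getElem?_eq_getElem (by omega : m < number.length)]
      rw [hw, hn, List.zip_append (by simp; omega), List.foldl_append]
      simp [List.getD, List.getElem?_eq_getElem (by omega : m < want.length),
        List.getElem?_eq_getElem (by omega : m < number.length)]
  rw [PySem.List.pyRange_one]
  simp only [List.foldl_map, zero_add, Int.sub_zero, Int.toNat_natCast, PySem.List.pyGetD_natCast]
  rw [aux want.length (le_refl _) h]
  rw [List.take_length, zip_take_right _ _ h]

theorem foldl_map_explicit {α β γ : Type} (f : β → γ) (g : α → γ → α) (l : List β) (init : α) :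
    (l.map f).foldl g init = l.foldl (fun x y => g x (f y)) init := by
  induction l generalizing init <;> simp [*]

theorem A_eq_countP (want : List String) (number : List Int) (discount : List String)
    (h : want.length ≤ number.length) :
    solution want number discount =
      (((List.range (discount.length - 9)).countP
        (winPred ((want.zip number).foldl (fun ch p => ch.setdefault p.1 p.2) PySem.Dict.empty) discount) : Nat) : Int) := by
  simp only [solution]
  rw [checkA_eq_checkB _ _ h]
  rw [PySem.List.pyRange_one 0 ((discount.length : Int) - 10 + 1)]
  have ht : (((discount.length : Int) - 10 + 1) - 0).toNat = discount.length - 9 := by omega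
  rw [ht, List.foldl_map]
  have hstep := PySem.List.foldl_if_add_one
    (winPred ((want.zip number).foldl (fun ch p => ch.setdefault p.1 p.2) PySem.Dict.empty) discount)
    (List.range (discount.length - 9)) 0
  rw [zero_add] at hstep
  rw [← hstep]
  apply PySem.List.foldl_congr_mem
  intro acc k hk
  have hk10 : k + 10 ≤ discount.length := by
    have := List.mem_range.mp hk; omega
  have hcnt : (PySem.List.pyRange (0 + (k : Int)) (10 + (0 + (k : Int)))).foldl
      (fun d j =>
        (d.setdefault (PySem.List.pyGetD discount j "") 0).insert (PySem.List.pyGetD discount j "")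
          ((d.setdefault (PySem.List.pyGetD discount j "") 0).getD (PySem.List.pyGetD discount j "") 0 + 1))
      PySem.Dict.empty = PySem.Dict.counter (win discount k) := by
    rw [zero_add, PySem.List.pyRange_one]
    have h10 : ((10 : Int) + (k : Int) - (k : Int)).toNat = 10 := by omega
    rw [h10, List.foldl_map]
    have hfun : (fun (d : PySem.Dict String Int) (j : Nat) =>
        (d.setdefault (PySem.List.pyGetD discount ((k : Int) + (j : Int)) "") 0).insert
          (PySem.List.pyGetD discount ((k : Int) + (j : Int)) "")
          ((d.setdefault (PySem.List.pyGetD discount ((k : Int) + (j : Int)) "") 0).getD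
            (PySem.List.pyGetD discount ((k : Int) + (j : Int)) "") 0 + 1))
        = fun (d : PySem.Dict String Int) (j : Nat) =>
            d.insert (PySem.List.pyGetD discount ((k : Int) + (j : Int)) "")
              (d.getD (PySem.List.pyGetD discount ((k : Int) + (j : Int)) "") 0 + 1) :=
      funext fun d => funext fun j => stepA_collapse d _
    rw [hfun, ← PySem.Dict.foldl_insert_getD_add_one_eq_counter,
      ← map_range_pyGetD discount k hk10, foldl_map_explicit]
  rw [hcnt]
  unfold winPred
  rfl

-- B-side proof helpers: the loop body of solution_alt, split into window update and full step
def stepW (discount : List String) (w : PySem.Dict String Int) (i : Int) (x : String) : PySem.Dict String Int :=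
  let w1 := w.insert x (w.getD x 0 + 1)
  if 10 ≤ i then
    let out := PySem.List.pyGetD discount (i - 10) ""
    let c := w1.getD out 0 - 1
    if c = 0 then w1.erase out else w1.insert out c
  else w1

def stepB (discount : List String) (check : PySem.Dict String Int)
    (st : PySem.Dict String Int × Int) (p : Int × String) : PySem.Dict String Int × Int :=
  (stepW discount st.1 p.1 p.2,
   if 9 ≤ p.1 && pyDictEq (stepW discount st.1 p.1 p.2) check then st.2 + 1 else st.2)

theorem window_eq_win (pre : List String) (x : String) (rest' : List String) (h9 : 9 ≤ pre.length) :
    (pre ++ [x]).drop ((pre ++ [x]).length - 10) = win (pre ++ x :: rest') (pre.length - 9) := by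
  have h1 : pre ++ x :: rest' = (pre ++ [x]) ++ rest' := by simp
  have h2 : pre.length - 9 - (pre ++ [x]).length = 0 := by simp; omega
  have h3 : (pre ++ [x]).length - 10 = pre.length - 9 := by simp
  have hlenD : ((pre ++ [x]).drop (pre.length - 9)).length = 10 := by simp; omega
  rw [win, h1]
  conv_rhs => rw [List.drop_append]
  rw [h2, List.drop_zero, List.take_append, List.take_of_length_le (by rw [hlenD]), hlenD,
    Nat.sub_self, List.take_zero, List.append_nil]
  try rw [h3]

theorem stepW_get? (discount pre : List String) (x : String) (rest' : List String)
    (hd : discount = pre ++ x :: rest') (w : PySem.Dict String Int)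
    (hw : ∀ k, w.get? k = winMap pre k) (k : String) :
    (stepW discount w (pre.length : Int) x).get? k = winMap (pre ++ [x]) k := by
  subst hd
  have hmid_get : ∀ q, (w.insert x (w.getD x 0 + 1)).get? q =
      (if (pre.drop (pre.length - 10) ++ [x]).count q = 0 then none
       else some (((pre.drop (pre.length - 10) ++ [x]).count q : Nat) : Int)) := by
    intro q
    rw [PySem.Dict.get?_insert]
    by_cases hq : q = x
    · rw [if_pos hq, hq]
      have hgd : w.getD x 0 = ((pre.drop (pre.length - 10)).count x : Int) := by
        have hgen : ∀ (c : Nat), (if c = 0 then (none : Option Int) else some ((c : Nat) : Int)).getD 0 = ((c : Nat) : Int) := by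
          intro c; by_cases h0 : c = 0 <;> simp [h0]
        rw [PySem.Dict.getD_eq_get?_getD, hw x]
        simp only [winMap]
        rw [hgen]
      have hcm : (pre.drop (pre.length - 10) ++ [x]).count x
          = (pre.drop (pre.length - 10)).count x + 1 := by simp
      rw [hgd, hcm, if_neg (by omega)]
      push_cast
      ring_nf
    · rw [if_neg hq, hw q, winMap]
      have hcm : (pre.drop (pre.length - 10) ++ [x]).count q
          = (pre.drop (pre.length - 10)).count q := by
        simp [Ne.symm hq]
      rw [hcm]
  unfold stepW
  by_cases h10 : 10 ≤ pre.length
  · rw [if_pos (by exact_mod_cast h10 : (10 : Int) ≤ (pre.length : Int))]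
    have hlt : pre.length - 10 < pre.length := by omega
    have hout : PySem.List.pyGetD (pre ++ x :: rest') ((pre.length : Int) - 10) ""
        = pre[pre.length - 10]'hlt := by
      have hidx : ((pre.length : Int) - 10) = ((pre.length - 10 : Nat) : Int) := by omega
      have ho1 : pre.length - 10 < (pre ++ x :: rest').length := by simp; omega
      rw [hidx, PySem.List.pyGetD_natCast, List.getD_eq_getElem _ _ ho1]
      exact List.getElem_append_left hlt
    rw [hout]
    have hdropp : pre.drop (pre.length - 10) = pre[pre.length - 10]'hlt :: pre.drop (pre.length - 9) := by
      rw [List.drop_eq_getElem_cons hlt]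
      congr 2
      omega
    have hmid_cons : pre.drop (pre.length - 10) ++ [x]
        = pre[pre.length - 10]'hlt :: (pre.drop (pre.length - 9) ++ [x]) := by
      rw [hdropp]; rfl
    have hgdout : (w.insert x (w.getD x 0 + 1)).getD (pre[pre.length - 10]'hlt) 0
        = ((pre.drop (pre.length - 10) ++ [x]).count (pre[pre.length - 10]'hlt) : Int) := by
      have hgen : ∀ (c : Nat), (if c = 0 then (none : Option Int) else some ((c : Nat) : Int)).getD 0 = ((c : Nat) : Int) := by
        intro c; by_cases h0 : c = 0 <;> simp [h0]
      rw [PySem.Dict.getD_eq_get?_getD, hmid_get, hgen]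
    have hcout : (pre.drop (pre.length - 10) ++ [x]).count (pre[pre.length - 10]'hlt)
        = (pre.drop (pre.length - 9) ++ [x]).count (pre[pre.length - 10]'hlt) + 1 := by
      rw [hmid_cons, List.count_cons_self]
    have hc : (w.insert x (w.getD x 0 + 1)).getD (pre[pre.length - 10]'hlt) 0 - 1
        = ((pre.drop (pre.length - 9) ++ [x]).count (pre[pre.length - 10]'hlt) : Int) := by
      rw [hgdout, hcout]; omega
    have hcount_ne : ∀ q, ¬ q = pre[pre.length - 10]'hlt →
        (pre.drop (pre.length - 10) ++ [x]).count q = (pre.drop (pre.length - 9) ++ [x]).count q := by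
      intro q hqne
      rw [hmid_cons, List.count_cons, if_neg (by simp [Ne.symm hqne])]
      omega
    have hnw_eq : (pre ++ [x]).drop ((pre ++ [x]).length - 10) = pre.drop (pre.length - 9) ++ [x] := by
      rw [List.drop_append]
      have e1 : (pre ++ [x]).length - 10 = pre.length - 9 := by simp
      have e2 : pre.length - 9 - pre.length = 0 := by omega
      rw [e1, e2]
      try rw [List.drop_zero]
    rw [winMap, hnw_eq]
    by_cases hc0 : (pre.drop (pre.length - 9) ++ [x]).count (pre[pre.length - 10]'hlt) = 0
    · rw [if_pos (by rw [hc, hc0]; rfl)]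
      rw [get?_erase_dict]
      by_cases hko : k = pre[pre.length - 10]'hlt
      · rw [if_pos hko, hko, if_pos hc0]
      · rw [if_neg hko, hmid_get k, hcount_ne k hko]
    · rw [if_neg (by rw [hc]; exact_mod_cast hc0)]
      rw [PySem.Dict.get?_insert]
      by_cases hko : k = pre[pre.length - 10]'hlt
      · rw [if_pos hko, hko, if_neg hc0, hc]
      · rw [if_neg hko, hmid_get k, hcount_ne k hko]
  · rw [if_neg (fun hco => h10 (by exact_mod_cast hco))]
    rw [hmid_get k, winMap]
    have e1 : pre.length - 10 = 0 := by omega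
    have e2 : (pre ++ [x]).length - 10 = 0 := by simp; omega
    rw [e1, e2, List.drop_zero, List.drop_zero]

theorem B_loop (discount : List String) (check : PySem.Dict String Int) :
    ∀ (rest pre : List String) (w : PySem.Dict String Int) (a : Int),
      discount = pre ++ rest →
      (∀ k, w.get? k = winMap pre k) →
      a = (((List.range (Nat.sub pre.length 9)).countP (winPred check discount) : Nat) : Int) →
      ((PySem.List.enumerate rest (pre.length : Int)).foldl (stepB discount check) (w, a)).2
      = (((List.range (discount.length - 9)).countP (winPred check discount) : Nat) : Int) := by
  intro rest
  induction rest with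
  | nil =>
    intro pre w a hd hw ha
    rw [PySem.List.enumerate_nil, List.foldl_nil, ha, hd]
    simp
  | cons x rest' ih =>
    intro pre w a hd hw ha
    rw [PySem.List.enumerate_cons, List.foldl_cons]
    have hstep : stepB discount check (w, a) ((pre.length : Int), x)
        = (stepW discount w (pre.length : Int) x,
           if 9 ≤ (pre.length : Int) && pyDictEq (stepW discount w (pre.length : Int) x) check
           then a + 1 else a) := rfl
    rw [hstep]
    have hW : ∀ k, (stepW discount w (pre.length : Int) x).get? k = winMap (pre ++ [x]) k :=
      stepW_get? discount pre x rest' hd w hw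
    have hstart : (pre.length : Int) + 1 = (((pre ++ [x]).length : Nat) : Int) := by
      simp
    have ha' : (if 9 ≤ (pre.length : Int) && pyDictEq (stepW discount w (pre.length : Int) x) check
        then a + 1 else a)
        = (((List.range (Nat.sub (pre ++ [x]).length 9)).countP (winPred check discount) : Nat) : Int) := by
      by_cases h9 : 9 ≤ pre.length
      · have hb : decide (9 ≤ (pre.length : Int)) = true := by
          simp only [decide_eq_true_eq]
          exact_mod_cast h9
        rw [hb, Bool.true_and]
        have hmatch : pyDictEq (stepW discount w (pre.length : Int) x) check
            = winPred check discount (pre.length - 9) := by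
          unfold winPred
          apply pyDictEq_congr_left
          intro k
          rw [hW k, winMap, window_eq_win pre x rest' h9, ← hd, get?_counter_eq]
        rw [hmatch]
        have hr : Nat.sub (pre ++ [x]).length 9 = (pre.length - 9) + 1 := by simp; omega
        rw [hr, List.range_succ, List.countP_append, ha]
        by_cases hp : winPred check discount (pre.length - 9) = true <;> simp [hp]
      · have hb : decide (9 ≤ (pre.length : Int)) = false := by
          simp only [decide_eq_false_iff_not]
          intro hco
          exact h9 (by exact_mod_cast hco)
        rw [hb, Bool.false_and, if_neg (by simp)]
        rw [ha]
        have : Nat.sub (pre ++ [x]).length 9 = Nat.sub pre.length 9 := by simp; omega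
        rw [this]
    rw [ha', hstart]
    exact ih (pre ++ [x]) (stepW discount w (pre.length : Int) x) _ (by rw [hd]; simp) hW rfl

theorem B_eq_countP (want : List String) (number : List Int) (discount : List String) :
    solution_alt want number discount =
      (((List.range (discount.length - 9)).countP
        (winPred ((want.zip number).foldl (fun ch p => ch.setdefault p.1 p.2) PySem.Dict.empty) discount) : Nat) : Int) := by
  have h0 : ∀ k, (PySem.Dict.empty : PySem.Dict String Int).get? k = winMap [] k := by
    intro k
    simp [winMap, PySem.Dict.get?_empty]
  exact B_loop discount _ discount [] PySem.Dict.empty 0 (by simp) h0 (by simp)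

-- ===== VERDICT (by name: the statement is the Claim_ definition above) =====
theorem solution_spec : Claim_equal_solution := by
  intro want number discount _ hpre
  unfold Spec_solution
  rw [A_eq_countP want number discount hpre, B_eq_countP]
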